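-- pv_equiv track=rewrite | github.com/RitamSaha001/lalacore-omega | tools/build_jee_bank_x.py | _extract_layer_details
-- ===== SOURCE A (Python) =====
-- def _extract_layer_details(repair_actions: list[str]) -> dict[str, list[str]]:
--     layers: dict[str, list[str]] = {}
--     for token in repair_actions:
--         if ":" not in token:
--             continue
--         layer_name, action = token.split(":", 1)
--         layer_name = layer_name.strip()
--         action = action.strip()
--         if not layer_name or not action:
--             continue
--         layers.setdefault(layer_name, [])
--         if action not in layers[layer_name]:
--             layers[layer_name].append(action)
--     return layers
-- ===== SOURCE B (Python) =====
-- # B: separates parsing (helper + comprehension), collection (duplicates allowed),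
-- # and deduplication (single dict.fromkeys pass) instead of A's inline parse +
-- # membership-checked append.
--
-- def _parse(token: str):
--     if ":" not in token:
--         return None
--     layer_name, action = token.split(":", 1)
--     layer_name = layer_name.strip()
--     action = action.strip()
--     if not layer_name or not action:
--         return None
--     return layer_name, action
--
--
-- def _extract_layer_details(repair_actions: list[str]) -> dict[str, list[str]]:
--     pairs = [p for p in map(_parse, repair_actions) if p is not None]
--     layers: dict[str, list[str]] = {}
--     for layer_name, action in pairs:
--         layers.setdefault(layer_name, []).append(action)
--     for layer_name in layers:
--         layers[layer_name] = list(dict.fromkeys(layers[layer_name]))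
--     return layers
-- ===== Notes on version B (the rewrite author's own statement) =====
-- stated objective: alternative
-- what changed: A parses inline and checks list membership before every append; B factors parsing into a helper mapped over the input, collects actions per layer with duplicates allowed, and removes duplicates in one dict.fromkeys pass per layer afterwards.
import Mathlib
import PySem

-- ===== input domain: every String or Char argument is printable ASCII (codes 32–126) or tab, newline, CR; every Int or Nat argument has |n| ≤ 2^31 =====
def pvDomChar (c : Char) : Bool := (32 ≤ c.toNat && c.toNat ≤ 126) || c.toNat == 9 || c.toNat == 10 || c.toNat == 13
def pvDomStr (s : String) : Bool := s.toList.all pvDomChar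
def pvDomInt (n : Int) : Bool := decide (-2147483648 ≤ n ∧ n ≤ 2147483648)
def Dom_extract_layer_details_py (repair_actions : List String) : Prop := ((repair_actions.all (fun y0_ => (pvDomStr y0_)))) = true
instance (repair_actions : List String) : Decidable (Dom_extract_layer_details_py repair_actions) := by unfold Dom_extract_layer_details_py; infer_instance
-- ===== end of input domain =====

-- B restructures A: parsing becomes a helper mapped/filtered over the input, actions are
-- collected per layer with duplicates allowed, and duplicates are removed in a separate
-- dict.fromkeys-style pass; same return value as A (objective: alternative decomposition).


-- ===== PORT A =====
def pvStepA (layers : PySem.Dict String (List String)) (token : String) : PySem.Dict String (List String) :=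
  if PySem.Str.isIn ":" token = false then layers
  else
    match PySem.Str.splitMax? token ":" 1 with
    | some [ln0, ac0] =>
        let layer_name := PySem.Str.strip ln0
        let action := PySem.Str.strip ac0
        if layer_name = "" ∨ action = "" then layers
        else
          let layers1 := layers.setdefault layer_name []
          if action ∈ layers1.getD layer_name [] then layers1
          else layers1.insert layer_name (layers1.getD layer_name [] ++ [action])
    | _ => layers

def extract_layer_details_py (repair_actions : List String) : List (String × List String) :=
  (repair_actions.foldl pvStepA PySem.Dict.empty).items

-- ===== PORT B =====
def pvParse (token : String) : Option (String × String) :=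
  if PySem.Str.isIn ":" token = false then none
  else
    match PySem.Str.splitMax? token ":" 1 with
    | some [ln0, ac0] =>
        let layer_name := PySem.Str.strip ln0
        let action := PySem.Str.strip ac0
        if layer_name = "" ∨ action = "" then none
        else some (layer_name, action)
    | _ => none

def pvGroup (layers : PySem.Dict String (List String)) (p : String × String) : PySem.Dict String (List String) :=
  layers.modify p.1 [] (· ++ [p.2])

def pvMapDedup (d : PySem.Dict String (List String)) : PySem.Dict String (List String) :=
  PySem.Dict.mk (d.items.map (fun p => (p.1, PySem.List.dedup p.2)))

def extract_layer_details_py_alt (repair_actions : List String) : List (String × List String) :=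
  (pvMapDedup ((repair_actions.filterMap pvParse).foldl pvGroup PySem.Dict.empty)).items

-- ===== PRECONDITION & SPEC =====
def Spec_extract_layer_details_py (repair_actions : List String) (out : List (String × List String)) : Prop := out = extract_layer_details_py_alt repair_actions
instance (repair_actions : List String) (out : List (String × List String)) : Decidable (Spec_extract_layer_details_py repair_actions out) := by unfold Spec_extract_layer_details_py; infer_instance

-- ===== CLAIM =====
def Claim_equal_extract_layer_details_py : Prop := ∀ (repair_actions : List String), Dom_extract_layer_details_py repair_actions → Spec_extract_layer_details_py repair_actions (extract_layer_details_py repair_actions)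

-- ===== LEMMAS AND PROOFS =====
theorem get?_mapDedup (d : PySem.Dict String (List String)) (k : String) :
    (pvMapDedup d).get? k = (d.get? k).map PySem.List.dedup := by
  simp [pvMapDedup, PySem.Dict.get?, List.find?_map, Function.comp_def, Option.map_map]

theorem getD_mapDedup (d : PySem.Dict String (List String)) (k : String) :
    (pvMapDedup d).getD k [] = PySem.List.dedup (d.getD k []) := by
  simp only [PySem.Dict.getD, get?_mapDedup]
  cases d.get? k <;> simp

theorem contains_mapDedup (d : PySem.Dict String (List String)) (k : String) :
    (pvMapDedup d).contains k = d.contains k := by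
  simp [pvMapDedup, PySem.Dict.contains, List.any_map, Function.comp_def]

theorem mapDedup_insert (d : PySem.Dict String (List String)) (k : String) (v : List String) :
    pvMapDedup (d.insert k v) = (pvMapDedup d).insert k (PySem.List.dedup v) := by
  apply PySem.Dict.ext
  have e1 : (pvMapDedup (d.insert k v)).items = (d.insert k v).items.map (fun p => (p.1, PySem.List.dedup p.2)) := rfl
  have e2 : (pvMapDedup d).items = d.items.map (fun p => (p.1, PySem.List.dedup p.2)) := rfl
  by_cases h : d.contains k = true
  · have h2 : (pvMapDedup d).contains k = true := by rw [contains_mapDedup]; exact h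
    rw [e1, PySem.Dict.items_insert_of_contains _ v h,
        PySem.Dict.items_insert_of_contains _ (PySem.List.dedup v) h2, e2]
    simp only [List.map_map]
    apply List.map_congr_left
    intro p _
    by_cases hp : p.1 == k <;> simp <;> simp_all
  · have h2 : (pvMapDedup d).contains k = false := by rw [contains_mapDedup]; simpa using h
    rw [e1, PySem.Dict.items_insert_of_not_contains _ v (by simpa using h),
        PySem.Dict.items_insert_of_not_contains _ (PySem.List.dedup v) h2, e2]
    simp

theorem mapDedup_setdefault (d : PySem.Dict String (List String)) (k : String) :
    pvMapDedup (d.setdefault k []) = (pvMapDedup d).setdefault k [] := by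
  by_cases h : d.contains k = true
  · rw [PySem.Dict.setdefault_of_contains _ _ h,
        PySem.Dict.setdefault_of_contains _ _ (by rw [contains_mapDedup]; exact h)]
  · have h2 : (pvMapDedup d).contains k = false := by rw [contains_mapDedup]; simpa using h
    rw [PySem.Dict.setdefault_of_not_contains _ _ (by simpa using h),
        PySem.Dict.setdefault_of_not_contains _ _ h2]
    rw [mapDedup_insert]
    rfl

theorem dedup_append_singleton (v : List String) (a : String) :
    PySem.List.dedup (v ++ [a]) = if a ∈ v then PySem.List.dedup v else PySem.List.dedup v ++ [a] := by
  show PySem.Set.ofList (v ++ [a]) = _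
  simp only [PySem.Set.ofList, List.foldl_append, List.foldl_cons, List.foldl_nil]
  show PySem.Set.add (PySem.Set.ofList v) a = _
  simp only [PySem.Set.add, PySem.Set.contains]
  by_cases h : a ∈ v
  · have : a ∈ PySem.Set.ofList v := (PySem.Set.mem_ofList v a).2 h
    simp [PySem.List.dedup, h, this]
  · have : a ∉ PySem.Set.ofList v := fun hh => h ((PySem.Set.mem_ofList v a).1 hh)
    simp [PySem.List.dedup, h, this]

theorem insert_getD_self (d : PySem.Dict String (List String)) (k : String)
    (hnd : d.keys.Nodup) (hc : d.contains k = true) :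
    d.insert k (d.getD k []) = d := by
  apply PySem.Dict.ext
  rw [PySem.Dict.items_insert_of_contains d (d.getD k []) hc]
  conv_rhs => rw [← List.map_id d.items]
  apply List.map_congr_left
  intro p hp
  by_cases hk : p.1 == k
  · have hk' : p.1 = k := by simpa using hk
    have hm : (k, p.2) ∈ d.items := by rw [← hk']; simpa using hp
    have hg := PySem.Dict.getD_of_mem_items d hm hnd []
    simp only [hk', hg]
    simp [← hk']
  · simp [hk]

theorem stepA_of_parse_none (d : PySem.Dict String (List String)) (t : String)
    (h : pvParse t = none) : pvStepA d t = d := by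
  unfold pvParse at h
  unfold pvStepA
  split at h
  · simp_all
  · split at h
    · next ln0 ac0 =>
        simp only at h ⊢
        split at h
        · simp_all
        · simp_all
    · next hm => simp_all

theorem core_comm (d : PySem.Dict String (List String)) (k a : String) (hnd : d.keys.Nodup) :
    (if a ∈ ((pvMapDedup d).setdefault k []).getD k [] then (pvMapDedup d).setdefault k []
     else ((pvMapDedup d).setdefault k []).insert k ((((pvMapDedup d).setdefault k []).getD k []) ++ [a]))
    = pvMapDedup (d.insert k (d.getD k [] ++ [a])) := by
  rw [show (pvMapDedup d).setdefault k [] = pvMapDedup (d.setdefault k []) from (mapDedup_setdefault d k).symm]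
  set e := d.setdefault k [] with he
  rw [getD_mapDedup]
  by_cases h : a ∈ e.getD k []
  · rw [if_pos (by rw [PySem.List.mem_dedup]; exact h)]
    by_cases hc : d.contains k = true
    · have hed : e = d := PySem.Dict.setdefault_of_contains _ _ hc
      rw [hed] at h ⊢
      rw [mapDedup_insert, dedup_append_singleton, if_pos h, ← mapDedup_insert,
          insert_getD_self d k hnd hc]
    · exfalso
      have hg : e.get? k = some [] := by
        rw [he, PySem.Dict.get?_setdefault_self]
        have : d.get? k = none := (PySem.Dict.get?_eq_none_iff_contains d k).2 (by simpa using hc)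
        rw [this]; rfl
      have : e.getD k [] = [] := by simp [PySem.Dict.getD, hg]
      rw [this] at h; exact absurd h (by simp)
  · rw [if_neg (by rw [PySem.List.mem_dedup]; exact h)]
    rw [show PySem.List.dedup (e.getD k []) ++ [a] = PySem.List.dedup (e.getD k [] ++ [a]) by
          rw [dedup_append_singleton, if_neg h]]
    rw [← mapDedup_insert]
    congr 1
    by_cases hc : d.contains k = true
    · rw [he, PySem.Dict.setdefault_of_contains _ _ hc]
    · have hcf : d.contains k = false := by simpa using hc
      have hg : e.get? k = some [] := by
        rw [he, PySem.Dict.get?_setdefault_self]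
        rw [(PySem.Dict.get?_eq_none_iff_contains d k).2 hcf]; rfl
      have hgd : e.getD k [] = [] := by simp [PySem.Dict.getD, hg]
      have hec : e.contains k = true := by
        rw [PySem.Dict.contains_eq_isSome_get? e k, hg]; rfl
      apply PySem.Dict.ext
      rw [PySem.Dict.items_insert_of_contains e (e.getD k [] ++ [a]) hec,
          PySem.Dict.items_insert_of_not_contains d (d.getD k [] ++ [a]) hcf]
      rw [show e.items = d.items ++ [(k, ([] : List String))] by
            rw [he]; simp [PySem.Dict.setdefault, hcf]]
      rw [List.map_append]
      congr 1
      · conv_rhs => rw [← List.map_id d.items]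
        apply List.map_congr_left
        intro p hp
        have hpf : (p.1 == k) = false := by
          by_contra hb
          have hpk : p.1 = k := by simpa using (Bool.not_eq_false _).mp hb
          have : d.contains k = true := by
            simp only [PySem.Dict.contains, List.any_eq_true]
            exact ⟨p, hp, by simp [hpk]⟩
          simp_all
        simp [hpf]
      · simp [hgd, PySem.Dict.getD_of_not_contains d _ hcf]

theorem stepA_of_parse_some (d : PySem.Dict String (List String)) (t k a : String)
    (hnd : d.keys.Nodup) (h : pvParse t = some (k, a)) :
    pvStepA (pvMapDedup d) t = pvMapDedup (pvGroup d (k, a)) := by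
  unfold pvParse at h
  unfold pvStepA
  split at h
  · simp_all
  next hIn =>
    rw [if_neg hIn]
    split at h
    next ln0 ac0 heq =>
      replace h : (if PySem.Str.strip ln0 = "" ∨ PySem.Str.strip ac0 = "" then none
                   else some (PySem.Str.strip ln0, PySem.Str.strip ac0)) = some (k, a) := h
      by_cases hne : PySem.Str.strip ln0 = "" ∨ PySem.Str.strip ac0 = ""
      · rw [if_pos hne] at h; exact absurd h (by simp)
      · rw [if_neg hne] at h
        have hpair := Option.some.inj h
        have hk : PySem.Str.strip ln0 = k := congrArg Prod.fst hpair
        have ha : PySem.Str.strip ac0 = a := congrArg Prod.snd hpair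
        show (if PySem.Str.strip ln0 = "" ∨ PySem.Str.strip ac0 = "" then pvMapDedup d else
          (if PySem.Str.strip ac0 ∈ ((pvMapDedup d).setdefault (PySem.Str.strip ln0) []).getD (PySem.Str.strip ln0) []
           then ((pvMapDedup d).setdefault (PySem.Str.strip ln0) [])
           else ((pvMapDedup d).setdefault (PySem.Str.strip ln0) []).insert (PySem.Str.strip ln0)
                ((((pvMapDedup d).setdefault (PySem.Str.strip ln0) []).getD (PySem.Str.strip ln0) []) ++ [PySem.Str.strip ac0])))
          = pvMapDedup (pvGroup d (k, a))
        rw [if_neg hne]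
        subst hk; subst ha
        exact core_comm d _ _ hnd
    next => simp_all

theorem foldA_eq (l : List String) (d : PySem.Dict String (List String)) (hnd : d.keys.Nodup) :
    l.foldl pvStepA (pvMapDedup d) = pvMapDedup ((l.filterMap pvParse).foldl pvGroup d) := by
  induction l generalizing d with
  | nil => simp
  | cons t l ih =>
    cases hp : pvParse t with
    | none =>
        simp only [List.foldl_cons, List.filterMap_cons, hp]
        rw [stepA_of_parse_none _ _ hp]
        exact ih d hnd
    | some p =>
        obtain ⟨k, a⟩ := p
        simp only [List.foldl_cons, List.filterMap_cons, hp]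
        rw [stepA_of_parse_some d t k a hnd hp]
        apply ih
        have : pvGroup d (k, a) = d.insert k (d.getD k [] ++ [a]) := rfl
        rw [this]
        exact PySem.Dict.nodup_keys_insert _ _ _ hnd

-- ===== VERDICT =====
theorem extract_layer_details_py_spec : Claim_equal_extract_layer_details_py := by
  intro ra _
  unfold Spec_extract_layer_details_py extract_layer_details_py extract_layer_details_py_alt
  have h0 : pvMapDedup PySem.Dict.empty = PySem.Dict.empty := rfl
  conv_lhs => rw [← h0]
  rw [foldA_eq ra PySem.Dict.empty (by simp [PySem.Dict.empty, PySem.Dict.keys])]
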